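-- pv_equiv track=rewrite | github.com/KevinAD/python_dab_timer | lib/termio/string_manipulation.py | make_banner
-- ===== SOURCE A (Python) =====
-- def get_max_length(text):
--     '''
--     Given a multi-line string, return the maximum line length.
--     '''
--     return max([len(line) for line in text])
--
-- def make_banner(text,width,height,top_char="=",side_char="|"):
--     '''
--     Parameters   :
--
--         text      : String of text to put on banner. Text should not have more lines
--                     than height - 2
--         width     : Integer number of character for banner to span (excludng sides)
--         height    :   Integer number of rows for the banner to take up
--                     (including top and bottom rows)
--         top_char  : Character to use for top and bottom of banner
--         side_char : Character to use for banner sides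
--
--     Return Value : Multi line string of the drawn banner frame
--
--     Description  :
--
--         A function to wrap a given string of text in a decorative frame of characters.
--         Each line of text is centered in the row, text must not contain more lines
--         than the number of rows allotted to text (height - 2), nor may text contain
--         a line longer than the alotted width (width).
--
--     '''
--
--     #=== Initialize =========================================#
--     if (height < 3): raise Exception('Banner height must be larger than 3. (Height: {})'.format(height))
--     if (get_max_length(text) > width): raise Exception('Text too large to fit in banner. (Max Line Length: {}) (Width: {})'.format(get_max_length(text),width))
--
--     #--- Set Variables --------------------------------------#
--
--     banner_midpoint = (height // 2)
--
--     text_list = text.split("\n")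
--
--     text_midpoint = len(text_list) // 2
--
--     if (height-2 < len(text_list)): #Banner must have free space for text
--         raise Exception('Banner too small to fit text. (Banner Height: {}) (Number of Lines: {})'.format(height,len(text_list)))
--
--     text_begin = banner_midpoint - text_midpoint
--
--     banner = []
--
--     #=== Build Banner =======================================#
--     for line_index in range(height):
--
--         #--- Add top and bottom bars ------------------------#
--         if(line_index == 0 or line_index == height-1):
--             banner.append(top_char*width)
--
--         #--- Add text if any --------------------------------#
--         elif(line_index>=text_begin and line_index < text_begin+len(text_list)):
--             banner.append(text_list[line_index-text_begin].center(width))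
--             banner[line_index] = side_char + banner[line_index][1:-1] + side_char
--
--         #--- Add line with no text --------------------------#
--         else:
--             banner.append(side_char+(" "*(width-2))+side_char)
--
--     #=== Combine and Return =================================#
--     return "\n".join(banner)
-- ===== SOURCE B (Python) =====
-- def get_max_length(text):
--     '''
--     Given a multi-line string, return the maximum line length.
--     '''
--     return max([len(line) for line in text])
--
-- def make_banner(text, width, height, top_char="=", side_char="|"):
--     '''Canvas approach: fill a blank interior, then stamp the centered text
--     lines over it, and frame with top/bottom bars.'''
--     if height < 3:
--         raise Exception('Banner height must be larger than 3. (Height: {})'.format(height))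
--     if get_max_length(text) > width:
--         raise Exception('Text too large to fit in banner. (Max Line Length: {}) (Width: {})'.format(get_max_length(text), width))
--
--     text_list = text.split("\n")
--     if height - 2 < len(text_list):
--         raise Exception('Banner too small to fit text. (Banner Height: {}) (Number of Lines: {})'.format(height, len(text_list)))
--
--     text_begin = (height // 2) - (len(text_list) // 2)
--
--     interior = [side_char + " " * (width - 2) + side_char for _ in range(height - 2)]
--     for i, line in enumerate(text_list):
--         interior[text_begin - 1 + i] = side_char + line.center(width)[1:-1] + side_char
--
--     bar = top_char * width
--     return "\n".join([bar] + interior + [bar])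
-- ===== Notes on version B (the rewrite author's own statement) =====
-- stated objective: alternative
-- what changed: A decides each row inside one loop over range(height); B builds the banner as a canvas: it fills a blank interior, stamps the centered text lines over it by index assignment, and frames it with top/bottom bars.
import Mathlib
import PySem

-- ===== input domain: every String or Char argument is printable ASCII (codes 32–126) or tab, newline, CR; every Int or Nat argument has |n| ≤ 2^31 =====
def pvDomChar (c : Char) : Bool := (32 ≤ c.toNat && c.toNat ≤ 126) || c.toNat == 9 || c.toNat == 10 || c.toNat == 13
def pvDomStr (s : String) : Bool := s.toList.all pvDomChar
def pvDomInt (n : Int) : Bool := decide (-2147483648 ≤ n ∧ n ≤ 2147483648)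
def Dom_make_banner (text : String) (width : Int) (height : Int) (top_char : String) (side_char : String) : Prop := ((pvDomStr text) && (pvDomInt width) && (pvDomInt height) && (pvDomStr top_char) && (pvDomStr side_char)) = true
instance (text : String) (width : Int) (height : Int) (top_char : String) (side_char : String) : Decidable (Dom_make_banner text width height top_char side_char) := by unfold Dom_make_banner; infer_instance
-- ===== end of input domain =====

-- B rebuilds the banner as a canvas (blank interior filled first, text lines stamped over it, bars framed on),
-- instead of A's single decision-per-row loop; same cost, different decomposition.


-- ===== PORT A =====

-- str.center(w) with space fill, hand-ported (no PySem primitive): exact CPython formula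
-- left = marg // 2 + (marg & w & 1), including the parity quirk.
def pyCenter (s : List Char) (w : Int) : List Char :=
  if w ≤ (s.length : Int) then s
  else
    let marg := w - (s.length : Int)
    let left := PySem.Int.floordiv marg 2 + PySem.Int.band (PySem.Int.band marg w) 1
    List.replicate left.toNat ' ' ++ s ++ List.replicate (marg - left).toNat ' '

-- max([len(line) for line in text]): iterating a str yields its 1-char strings; none = ValueError on ""
def get_max_length (text : List Char) : Option Int :=
  PySem.List.max? (text.map (fun c => (PySem.Chars.len [c] : Int))) (fun x => x)

def make_banner (text : String) (width : Int) (height : Int) (top_char : String) (side_char : String) : String :=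
  if height < 3 then "" else  -- Python raises Exception here
  match get_max_length text.toList with
  | none => ""                -- Python: ValueError from max([]) on empty text
  | some m =>
    if m > width then "" else -- Python raises Exception here
    let banner_midpoint := PySem.Int.floordiv height 2
    let text_list := PySem.Chars.splitOn text.toList ['\n']
    let text_midpoint := PySem.Int.floordiv (text_list.length : Int) 2
    if height - 2 < (text_list.length : Int) then "" else -- Python raises Exception here
    let text_begin := banner_midpoint - text_midpoint
    let banner := (PySem.List.pyRange 0 height 1).foldl (fun banner line_index =>
      if line_index = 0 ∨ line_index = height - 1 then
        banner ++ [PySem.List.pyRepeat top_char.toList width]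
      else if text_begin ≤ line_index ∧ line_index < text_begin + (text_list.length : Int) then
        let banner := banner ++ [pyCenter (PySem.List.pyGetD text_list (line_index - text_begin) []) width]
        PySem.List.pySetD banner line_index
          (side_char.toList ++ PySem.List.slice (PySem.List.pyGetD banner line_index []) (some 1) (some (-1)) ++ side_char.toList)
      else
        banner ++ [side_char.toList ++ PySem.List.pyRepeat [' '] (width - 2) ++ side_char.toList]) []
    String.ofList (PySem.Chars.join ['\n'] banner)

-- ===== PORT B =====
def make_banner_alt (text : String) (width : Int) (height : Int) (top_char : String) (side_char : String) : String :=
  if height < 3 then "" else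
  match get_max_length text.toList with
  | none => ""
  | some m =>
    if m > width then "" else
    let text_list := PySem.Chars.splitOn text.toList ['\n']
    if height - 2 < (text_list.length : Int) then "" else
    let text_begin := PySem.Int.floordiv height 2 - PySem.Int.floordiv (text_list.length : Int) 2
    let interior := List.replicate (height - 2).toNat
      (side_char.toList ++ PySem.List.pyRepeat [' '] (width - 2) ++ side_char.toList)
    let interior := (PySem.List.enumerate text_list 0).foldl (fun acc p =>
      PySem.List.pySetD acc (text_begin - 1 + p.1)
        (side_char.toList ++ PySem.List.slice (pyCenter p.2 width) (some 1) (some (-1)) ++ side_char.toList)) interior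
    let bar := PySem.List.pyRepeat top_char.toList width
    String.ofList (PySem.Chars.join ['\n'] ([bar] ++ interior ++ [bar]))

-- ===== PRECONDITION & SPEC =====
-- Pre_ excludes exactly the inputs on which A raises: height < 3, empty text (ValueError in max),
-- width < 1 (the character-wise max-length check), and more text lines than height - 2 rows.
def Pre_make_banner (text : String) (width : Int) (height : Int) (top_char : String) (side_char : String) : Prop :=
  3 ≤ height ∧ 1 ≤ width ∧ text ≠ "" ∧
  ((PySem.Chars.splitOn text.toList ['\n']).length : Int) ≤ height - 2

instance (text : String) (width : Int) (height : Int) (top_char : String) (side_char : String) : Decidable (Pre_make_banner text width height top_char side_char) := by unfold Pre_make_banner; infer_instance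

def pvWitness_make_banner : String × Int × Int × String × String := ("hi\nyou", 6, 5, "=", "|")

def Spec_make_banner (text : String) (width : Int) (height : Int) (top_char : String) (side_char : String) (out : String) : Prop := out = make_banner_alt text width height top_char side_char
instance (text : String) (width : Int) (height : Int) (top_char : String) (side_char : String) (out : String) : Decidable (Spec_make_banner text width height top_char side_char out) := by unfold Spec_make_banner; infer_instance

-- ===== CLAIM (what is proved, stated in full; the proofs are below) =====
def Claim_equal_make_banner : Prop := ∀ (text : String) (width : Int) (height : Int) (top_char : String) (side_char : String), Dom_make_banner text width height top_char side_char → Pre_make_banner text width height top_char side_char → Spec_make_banner text width height top_char side_char (make_banner text width height top_char side_char)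

-- ===== LEMMAS AND PROOFS =====

-- A's loop, generalized: append/append-set fold over pyRange a h equals a map, given length invariant
theorem pv_foldA (h tb L : Int) (top blank sideL : List Char) (cT : Int → List Char) :
  ∀ (n : Nat) (a : Int) (acc : List (List Char)), (h - a).toNat = n → 0 ≤ a → acc.length = a.toNat →
    (PySem.List.pyRange a h 1).foldl
      (fun banner i =>
        if i = 0 ∨ i = h - 1 then banner ++ [top]
        else if tb ≤ i ∧ i < tb + L then
          let banner := banner ++ [cT i]
          PySem.List.pySetD banner i
            (sideL ++ PySem.List.slice (PySem.List.pyGetD banner i []) (some 1) (some (-1)) ++ sideL)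
        else banner ++ [blank]) acc
    = acc ++ (PySem.List.pyRange a h 1).map (fun i =>
        if i = 0 ∨ i = h - 1 then top
        else if tb ≤ i ∧ i < tb + L then
          sideL ++ PySem.List.slice (cT i) (some 1) (some (-1)) ++ sideL
        else blank) := by
  intro n
  induction n with
  | zero =>
    intro a acc hn ha hl
    rw [PySem.List.pyRange_one_eq_nil (by omega)]
    simp
  | succ k ih =>
    intro a acc hn ha hl
    have hab : a < h := by omega
    rw [PySem.List.pyRange_one_cons hab]
    simp only [List.foldl_cons, List.map_cons]
    have hstep :
        (if a = 0 ∨ a = h - 1 then acc ++ [top]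
         else if tb ≤ a ∧ a < tb + L then
           PySem.List.pySetD (acc ++ [cT a]) a
             (sideL ++ PySem.List.slice (PySem.List.pyGetD (acc ++ [cT a]) a []) (some 1) (some (-1)) ++ sideL)
         else acc ++ [blank])
        = acc ++ [if a = 0 ∨ a = h - 1 then top
           else if tb ≤ a ∧ a < tb + L then
             sideL ++ PySem.List.slice (cT a) (some 1) (some (-1)) ++ sideL
           else blank] := by
      split_ifs with h1 h2
      · rfl
      · have hcast : a = ((acc.length : Nat) : Int) := by omega
        rw [hcast, PySem.List.pyGetD_natCast, PySem.List.pySetD_natCast]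
        simp
      · rfl
    rw [hstep, ih (a + 1) _ (by omega) (by omega) (by simp [hl]; omega)]
    simp

-- fold of index assignments over a pyRange, pointwise
theorem pv_setfold (off : Int) (rows : Int → List Char) :
  ∀ (n : Nat) (a b : Int) (cur : List (List Char)) (m : Nat),
    (b - a).toNat = n → a ≤ b → 0 ≤ off + a → (off + b) ≤ (cur.length : Int) →
    ((PySem.List.pyRange a b 1).foldl
      (fun acc j => PySem.List.pySetD acc (off + j) (rows j)) cur)[m]? =
      if off + a ≤ (m : Int) ∧ (m : Int) < off + b then some (rows ((m : Int) - off))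
      else cur[m]? := by
  intro n
  induction n with
  | zero =>
    intro a b cur m hn hab h0 hlen
    have hba : b ≤ a := by omega
    rw [PySem.List.pyRange_one_eq_nil hba]
    simp only [List.foldl_nil]
    rw [if_neg (by omega)]
  | succ k ih =>
    intro a b cur m hn hab h0 hlen
    have hab' : a < b := by omega
    rw [PySem.List.pyRange_one_cons hab']
    simp only [List.foldl_cons]
    have hset : PySem.List.pySetD cur (off + a) (rows a) = cur.set (off + a).toNat (rows a) :=
      PySem.List.pySetD_of_nonneg cur (rows a) h0
    rw [hset, ih (a+1) b _ m (by omega) (by omega) (by omega) (by simp; omega)]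
    by_cases hm1 : off + (a + 1) ≤ (m : Int) ∧ (m : Int) < off + b
    · rw [if_pos hm1, if_pos (by omega)]
    · rw [if_neg hm1]
      by_cases hm2 : (m : Int) = off + a
      · rw [if_pos (by omega)]
        have hmn : m = (off + a).toNat := by omega
        rw [hmn, List.getElem?_set_self]
        · have : (((off + a).toNat : Int)) - off = a := by omega
          rw [this]
        · omega
      · rw [if_neg (by omega), List.getElem?_set_ne (by omega)]


theorem pv_gml (t : List Char) (ht : t ≠ []) : get_max_length t = some 1 := by
  unfold get_max_length
  cases hmx : PySem.List.max? (t.map (fun c => (PySem.Chars.len [c] : Int))) (fun x => x) with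
  | none =>
    have h0 := (PySem.List.max?_eq_none_iff _ _).mp hmx
    simp at h0
    exact absurd h0 ht
  | some m =>
    have hmem := PySem.List.max?_mem hmx
    simp [PySem.Chars.len] at hmem
    rw [hmem.2]


theorem pv_main (text : String) (width : Int) (height : Int) (top_char : String) (side_char : String)
    (hpre : Pre_make_banner text width height top_char side_char) :
    make_banner text width height top_char side_char
      = make_banner_alt text width height top_char side_char := by
  obtain ⟨h3, hw, htxt, hlines⟩ := hpre
  have ht : text.toList ≠ [] := by
    simp only [ne_eq, String.toList_eq_nil_iff]
    exact htxt
  have hfd2 : PySem.Int.floordiv height 2 = height / 2 :=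
    PySem.Int.floordiv_eq_ediv_of_pos (by norm_num)
  have hfdL : PySem.Int.floordiv ((PySem.Chars.splitOn text.toList ['\n']).length : Int) 2
      = ((PySem.Chars.splitOn text.toList ['\n']).length : Int) / 2 :=
    PySem.Int.floordiv_eq_ediv_of_pos (by norm_num)
  rw [make_banner, make_banner_alt, pv_gml _ ht]
  simp only [if_neg (show ¬ height < 3 by omega),
             if_neg (show ¬ (1:Int) > width by omega),
             if_neg (show ¬ height - 2 < ((PySem.Chars.splitOn text.toList ['\n']).length : Int) by omega)]
  set L : Int := ((PySem.Chars.splitOn text.toList ['\n']).length : Int) with hLdef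
  have hL0 : 0 ≤ L := by positivity
  set tb : Int := PySem.Int.floordiv height 2 - PySem.Int.floordiv L 2 with htbdef
  have htb1 : 1 ≤ tb := by rw [htbdef, hfd2, hfdL]; omega
  have htb2 : tb - 1 + L ≤ height - 2 := by rw [htbdef, hfd2, hfdL]; omega
  -- A's fold to a map, and split the range at 1 and height - 1
  rw [pv_foldA height tb L (PySem.List.pyRepeat top_char.toList width)
        (side_char.toList ++ PySem.List.pyRepeat [' '] (width - 2) ++ side_char.toList)
        side_char.toList
        (fun i => pyCenter (PySem.List.pyGetD (PySem.Chars.splitOn text.toList ['\n']) (i - tb) []) width)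
        height.toNat 0 [] (by omega) le_rfl rfl]
  rw [List.nil_append,
      PySem.List.pyRange_one_append 0 1 height (by omega) (by omega),
      PySem.List.pyRange_one_append 1 (height - 1) height (by omega) (by omega)]
  have hr0 : PySem.List.pyRange 0 1 1 = [0] := by
    have h := PySem.List.pyRange_one_singleton (a := (0:Int)); simpa using h
  have hrh : PySem.List.pyRange (height - 1) height 1 = [height - 1] := by
    have h := PySem.List.pyRange_one_singleton (a := height - 1); simpa using h
  rw [hr0, hrh]
  simp only [List.map_append, List.map_cons, List.map_nil, true_or, or_true, if_true]
  -- B's enumerate-fold to a fold over pyRange 0 L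
  rw [PySem.List.enumerate_eq_map_pyRange (PySem.Chars.splitOn text.toList ['\n']) ([] : List Char),
      List.foldl_map]
  simp only [PySem.List.len]
  suffices hmid :
      (PySem.List.pyRange 1 (height - 1) 1).map (fun i =>
        if i = 0 ∨ i = height - 1 then PySem.List.pyRepeat top_char.toList width
        else if tb ≤ i ∧ i < tb + L then
          side_char.toList ++
            PySem.List.slice
              (pyCenter (PySem.List.pyGetD (PySem.Chars.splitOn text.toList ['\n']) (i - tb) []) width)
              (some 1) (some (-1)) ++ side_char.toList
        else side_char.toList ++ PySem.List.pyRepeat [' '] (width - 2) ++ side_char.toList)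
      = (PySem.List.pyRange 0 L 1).foldl
          (fun acc j => PySem.List.pySetD acc (tb - 1 + j)
            (side_char.toList ++
              PySem.List.slice
                (pyCenter (PySem.List.pyGetD (PySem.Chars.splitOn text.toList ['\n']) j []) width)
                (some 1) (some (-1)) ++ side_char.toList))
          (List.replicate (height - 2).toNat
            (side_char.toList ++ PySem.List.pyRepeat [' '] (width - 2) ++ side_char.toList)) by
    rw [hmid, ← hLdef, ← List.append_assoc]
  -- elementwise
  apply List.ext_getElem?
  intro m
  rw [pv_setfold (tb - 1)
        (fun j => side_char.toList ++ PySem.List.slice (pyCenter (PySem.List.pyGetD (PySem.Chars.splitOn text.toList ['\n']) j []) width) (some 1) (some (-1)) ++ side_char.toList)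
        L.toNat 0 L _ m (by omega) (by omega) (by omega) (by simp; omega)]
  simp only [List.getElem?_map, PySem.List.getElem?_pyRange_one]
  by_cases hm : m < ((height - 1) - 1).toNat
  · rw [if_pos hm]
    simp only [Option.map_some]
    have hne : ¬((1 + (m : Int)) = 0 ∨ (1 + (m : Int)) = height - 1) := by omega
    rw [if_neg hne]
    by_cases hin : tb - 1 + 0 ≤ (m : Int) ∧ (m : Int) < tb - 1 + L
    · rw [if_pos hin, if_pos (by omega)]
      have harg : 1 + (m : Int) - tb = (m : Int) - (tb - 1) := by omega
      rw [harg]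
    · rw [if_neg hin, if_neg (by omega)]
      rw [List.getElem?_replicate, if_pos (by omega)]
  · rw [if_neg hm, Option.map_none]
    rw [if_neg (by omega), List.getElem?_replicate, if_neg (by omega)]

-- ===== VERDICT (by name: the statement is the Claim_ definition above) =====
theorem make_banner_spec : Claim_equal_make_banner := by
  intro text width height top_char side_char _ hpre
  unfold Spec_make_banner
  exact pv_main text width height top_char side_char hpre
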